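-- pv_equiv track=rewrite | github.com/aakhundov/sequence-labeling | annotate.py | fix_initial_i_tags
-- ===== SOURCE A (Python) =====
-- def fix_initial_i_tags(labels):
--     num_fixed = 0
--     fixed_labels = []
--     for i in range(len(labels)):
--         label = labels[i]
--         if label.startswith("I-") and (i == 0 or labels[i-1][2:] != label[2:]):
--             fixed_labels.append("B-" + label[2:])
--             num_fixed += 1
--         else:
--             fixed_labels.append(label)
--     return fixed_labels, num_fixed
-- ===== SOURCE B (Python) =====
-- def fix_initial_i_tags(labels):
--     def run_end(suffix, k):
--         while k < len(labels) and labels[k][2:] == suffix: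
--             k += 1
--         return k
--
--     fixed = []
--     num_fixed = 0
--     i = 0
--     while i < len(labels):
--         first = labels[i]
--         suffix = first[2:]
--         j = run_end(suffix, i + 1)
--         if first.startswith("I-"):
--             fixed.append("B-" + suffix)
--             num_fixed += 1
--         else:
--             fixed.append(first)
--         fixed.extend(labels[i + 1:j])
--         i = j
--     return fixed, num_fixed
-- ===== Notes on version B (the rewrite author's own statement) =====
-- stated objective: alternative
-- what changed: Replaces A's flat index loop comparing labels[i-1][2:] with a run-based scan: the list is split into maximal runs of equal 2-character-stripped suffix and only the head of each run is converted from I- to B-.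
import Mathlib
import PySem

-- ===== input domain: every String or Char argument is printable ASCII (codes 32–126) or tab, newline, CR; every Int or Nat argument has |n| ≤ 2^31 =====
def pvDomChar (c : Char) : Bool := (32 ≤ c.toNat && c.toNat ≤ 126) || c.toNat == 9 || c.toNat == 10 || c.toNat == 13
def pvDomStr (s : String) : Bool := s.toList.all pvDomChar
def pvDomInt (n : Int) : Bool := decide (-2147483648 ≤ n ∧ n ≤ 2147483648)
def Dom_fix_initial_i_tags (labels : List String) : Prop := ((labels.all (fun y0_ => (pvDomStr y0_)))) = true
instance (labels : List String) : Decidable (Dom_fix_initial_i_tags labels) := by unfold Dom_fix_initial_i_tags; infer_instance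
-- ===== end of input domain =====

-- B replaces A's flat index loop (compare labels[i-1][2:]) with a run-based scan over
-- maximal runs of equal suffix; same O(n) cost, alternative decomposition.

-- label[2:]
def pvSuf (s : String) : String := PySem.Str.slice s (some 2) none

-- ===== PORT A =====
def fix_initial_i_tags (labels : List String) : List String × Int :=
  (PySem.List.pyRange 0 labels.length 1).foldl
    (fun (st : List String × Int) (i : Int) =>
      let label := PySem.List.pyGetD labels i ""
      if PySem.Str.startswith label "I-" = true ∧
          (i = 0 ∨ pvSuf (PySem.List.pyGetD labels (i - 1) "") ≠ pvSuf label) then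
        (st.1 ++ ["B-" ++ pvSuf label], st.2 + 1)
      else
        (st.1 ++ [label], st.2))
    ([], 0)

-- ===== PORT B =====
-- run_end: advance k while labels[k][2:] == suffix (fuel only makes the loop
-- structurally recursive; it is always sufficient at the call sites)
def pvRunEnd (labels : List String) (suffix : String) : Nat → Nat → Nat
  | 0, k => k
  | fuel + 1, k =>
    if h : k < labels.length then
      if pvSuf labels[k] = suffix then pvRunEnd labels suffix fuel (k + 1) else k
    else k

-- the outer while loop of B, on the index i
def pvAltGo (labels : List String) : Nat → List String → Int → Nat → List String × Int
  | 0, fixed, num_fixed, _ => (fixed, num_fixed)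
  | fuel + 1, fixed, num_fixed, i =>
    if h : i < labels.length then
      let first := labels[i]
      let suffix := pvSuf first
      let j := pvRunEnd labels suffix (labels.length - (i + 1)) (i + 1)
      if PySem.Str.startswith first "I-" = true then
        pvAltGo labels fuel
          (fixed ++ ["B-" ++ suffix] ++
            PySem.List.slice labels (some ((i + 1 : Nat) : Int)) (some ((j : Nat) : Int)))
          (num_fixed + 1) j
      else
        pvAltGo labels fuel
          (fixed ++ [first] ++
            PySem.List.slice labels (some ((i + 1 : Nat) : Int)) (some ((j : Nat) : Int)))
          num_fixed j
    else (fixed, num_fixed)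

def fix_initial_i_tags_alt (labels : List String) : List String × Int :=
  pvAltGo labels labels.length [] 0 0

-- ===== PRECONDITION & SPEC =====
def Spec_fix_initial_i_tags (labels : List String) (out : List String × Int) : Prop := out = fix_initial_i_tags_alt labels
instance (labels : List String) (out : List String × Int) : Decidable (Spec_fix_initial_i_tags labels out) := by unfold Spec_fix_initial_i_tags; infer_instance

-- ===== CLAIM (what is proved, stated in full; the proofs are below) =====
def Claim_equal_fix_initial_i_tags : Prop := ∀ (labels : List String), Dom_fix_initial_i_tags labels → Spec_fix_initial_i_tags labels (fix_initial_i_tags labels)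

-- ===== LEMMAS AND PROOFS =====

-- proof-side helpers: run splitting on lists (split_run materialized), and the
-- list-level version of B's loop
def pvSplitRun (suffix : String) : List String → List String × List String
  | [] => ([], [])
  | x :: xs =>
    if pvSuf x = suffix then
      let r := pvSplitRun suffix xs
      (x :: r.1, r.2)
    else ([], x :: xs)

theorem pvSplitRun_snd_length (suffix : String) (xs : List String) :
    (pvSplitRun suffix xs).2.length ≤ xs.length := by
  induction xs with
  | nil => simp [pvSplitRun]
  | cons x xs ih =>
    simp only [pvSplitRun]
    split_ifs with h
    · simp
      omega
    · simp

def pvAltLoop (fixed : List String) (num_fixed : Int) : List String → List String × Int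
  | [] => (fixed, num_fixed)
  | first :: rest0 =>
    let suffix := pvSuf first
    let pr := pvSplitRun suffix rest0
    if PySem.Str.startswith first "I-" = true then
      pvAltLoop (fixed ++ ["B-" ++ suffix] ++ pr.1) (num_fixed + 1) pr.2
    else
      pvAltLoop (fixed ++ [first] ++ pr.1) num_fixed pr.2
termination_by rest => rest.length
decreasing_by
  all_goals exact Nat.lt_succ_of_le (pvSplitRun_snd_length _ rest0)

-- A's loop, rephrased as a recursion carrying the previous label.
def pvGo : Option String → List String → Int → List String → List String × Int
  | _, acc, n, [] => (acc, n)
  | none, acc, n, l :: ls =>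
    if PySem.Str.startswith l "I-" then
      pvGo (some l) (acc ++ ["B-" ++ pvSuf l]) (n + 1) ls
    else pvGo (some l) (acc ++ [l]) n ls
  | some p, acc, n, l :: ls =>
    if PySem.Str.startswith l "I-" && decide (pvSuf p ≠ pvSuf l) then
      pvGo (some l) (acc ++ ["B-" ++ pvSuf l]) (n + 1) ls
    else pvGo (some l) (acc ++ [l]) n ls

theorem pvSplitRun_append (suffix : String) (xs : List String) :
    (pvSplitRun suffix xs).1 ++ (pvSplitRun suffix xs).2 = xs := by
  induction xs with
  | nil => simp [pvSplitRun]
  | cons x xs ih =>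
    simp only [pvSplitRun]
    split_ifs with h
    · simpa using ih
    · simp

theorem pvSplitRun_fst_suf (suffix : String) (xs : List String) :
    ∀ x ∈ (pvSplitRun suffix xs).1, pvSuf x = suffix := by
  induction xs with
  | nil => simp [pvSplitRun]
  | cons x xs ih =>
    simp only [pvSplitRun]
    split_ifs with h
    · intro y hy
      rcases List.mem_cons.1 hy with h' | h'
      · exact h' ▸ h
      · exact ih y h'
    · simp

theorem pvSplitRun_snd_head (suffix : String) (xs : List String) :
    ∀ hd ∈ (pvSplitRun suffix xs).2.head?, pvSuf hd ≠ suffix := by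
  induction xs with
  | nil => simp [pvSplitRun]
  | cons x xs ih =>
    simp only [pvSplitRun]
    split_ifs with h
    · exact ih
    · simpa using h

-- last element of a run keeps the run's suffix
theorem pvGetLastD_suf (s : String) (r : List String) : ∀ (d : String), pvSuf d = s →
    (∀ x ∈ r, pvSuf x = s) → pvSuf (r.getLastD d) = s := by
  induction r with
  | nil => intro d hd _; simpa [List.getLastD] using hd
  | cons a as ih =>
    intro d _ hall
    rw [List.getLastD_cons]
    exact ih a (hall a (List.mem_cons_self ..)) (fun y hy => hall y (List.mem_cons_of_mem _ hy))

theorem pvAltLoop_cons (fixed : List String) (n : Int) (first : String) (rest0 : List String) :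
    pvAltLoop fixed n (first :: rest0) =
      if PySem.Str.startswith first "I-" = true then
        pvAltLoop (fixed ++ ["B-" ++ pvSuf first] ++ (pvSplitRun (pvSuf first) rest0).1)
          (n + 1) (pvSplitRun (pvSuf first) rest0).2
      else
        pvAltLoop (fixed ++ [first] ++ (pvSplitRun (pvSuf first) rest0).1)
          n (pvSplitRun (pvSuf first) rest0).2 := by
  rw [pvAltLoop]

-- a whole run (all suffixes = s, previous suffix = s) is copied verbatim by pvGo
theorem pvGo_run (s : String) (run : List String) :
    ∀ (p : String) (acc : List String) (n : Int) (rest : List String),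
      pvSuf p = s → (∀ x ∈ run, pvSuf x = s) →
      pvGo (some p) acc n (run ++ rest) =
        pvGo (some (run.getLastD p)) (acc ++ run) n rest := by
  induction run with
  | nil => intro p acc n rest _ _; simp
  | cons x run ih =>
    intro p acc n rest hp hall
    have hx : pvSuf x = s := hall x (List.mem_cons_self ..)
    have hcf : (PySem.Str.startswith x "I-" && decide (pvSuf p ≠ pvSuf x)) = false := by
      simp [hp, hx]
    rw [List.cons_append, pvGo, hcf]
    simp only [Bool.false_eq_true, if_false]
    rw [ih x (acc ++ [x]) n rest hx (fun y hy => hall y (List.mem_cons_of_mem _ hy))]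
    cases run <;> simp [List.getLastD, List.getLast_cons]

-- pvGo = pvAltLoop when prev's suffix differs from the head's suffix (or prev = none)
theorem pvGo_eq_altLoop (rest : List String) : ∀ (prev : Option String)
    (acc : List String) (n : Int),
    (∀ p hd, prev = some p → rest.head? = some hd → pvSuf p ≠ pvSuf hd) →
    pvGo prev acc n rest = pvAltLoop acc n rest := by
  induction hk : rest.length using Nat.strong_induction_on generalizing rest with
  | _ k IH =>
  match rest with
  | [] => intro prev acc n _; cases prev <;> simp [pvGo, pvAltLoop]
  | l :: ls =>
    intro prev acc n hok
    set s := pvSuf l with hs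
    have hsplit := pvSplitRun_append s ls
    have hall := pvSplitRun_fst_suf s ls
    have hhd := pvSplitRun_snd_head s ls
    have hlen : (pvSplitRun s ls).2.length < k := by
      subst hk
      exact Nat.lt_succ_of_le (pvSplitRun_snd_length s ls)
    have hrun : ∀ (acc' : List String) (n' : Int), pvGo (some l) acc' n' ls =
        pvAltLoop (acc' ++ (pvSplitRun s ls).1) n' (pvSplitRun s ls).2 := by
      intro acc' n'
      conv_lhs => rw [← hsplit]
      rw [pvGo_run s (pvSplitRun s ls).1 l acc' n' (pvSplitRun s ls).2 rfl hall]
      refine IH _ hlen _ rfl _ _ _ ?_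
      intro q hd hq hhd'
      have hq' : q = (pvSplitRun s ls).1.getLastD l := by
        injection hq with h; exact h.symm
      have hqs : pvSuf q = s := by
        rw [hq']; exact pvGetLastD_suf s _ l hs.symm hall
      rw [hqs]
      exact (hhd hd hhd').symm
    cases prev with
    | none =>
      by_cases hI : PySem.Str.startswith l "I-" = true
      · rw [pvGo, if_pos hI, hrun, pvAltLoop_cons, if_pos hI]
      · rw [pvGo, if_neg hI, hrun, pvAltLoop_cons, if_neg hI]
    | some p =>
      have hne : pvSuf p ≠ s := hok p l rfl rfl
      have hdec : decide (pvSuf p ≠ pvSuf l) = true := by simp [← hs, hne]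
      by_cases hI : PySem.Str.startswith l "I-" = true
      · rw [pvGo, if_pos (by rw [hI, hdec]; rfl), hrun, pvAltLoop_cons, if_pos hI]
      · rw [pvGo, if_neg (by
            simp only [Bool.and_eq_true, decide_eq_true_eq, ne_eq, not_and, not_not]
            intro h; exact absurd h hI),
          hrun, pvAltLoop_cons, if_neg hI]

-- A's pyRange fold equals pvGo, by induction with the processed prefix generalized
theorem pvFold_eq_go (labels : List String) : ∀ (rest pre acc : List String) (n : Int),
    labels = pre ++ rest →
    (PySem.List.pyRange (pre.length) labels.length 1).foldl
      (fun (st : List String × Int) (i : Int) =>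
        let label := PySem.List.pyGetD labels i ""
        if PySem.Str.startswith label "I-" = true ∧
            (i = 0 ∨ pvSuf (PySem.List.pyGetD labels (i - 1) "") ≠ pvSuf label) then
          (st.1 ++ ["B-" ++ pvSuf label], st.2 + 1)
        else
          (st.1 ++ [label], st.2)) (acc, n)
      = pvGo pre.getLast? acc n rest := by
  intro rest
  induction rest with
  | nil =>
    intro pre acc n hpre
    have hl : (labels.length : Int) = (pre.length : Int) := by simp [hpre]
    rw [hl, PySem.List.pyRange_one_eq_nil (le_refl _)]
    cases hp : pre.getLast? <;> simp [pvGo]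
  | cons l ls ih =>
    intro pre acc n hpre
    have hlab : labels.length = pre.length + (ls.length + 1) := by simp [hpre]
    have hlt : (pre.length : Int) < (labels.length : Int) := by omega
    rw [PySem.List.pyRange_one_cons hlt, List.foldl_cons]
    have hget : PySem.List.pyGetD labels (pre.length : Int) "" = l := by
      rw [PySem.List.pyGetD_natCast, hpre]
      simp [List.getD]
    have hpre' : labels = (pre ++ [l]) ++ ls := by simp [hpre]
    have hlast' : (pre ++ [l]).getLast? = some l := by simp
    have hcast : (((pre ++ [l]).length : Nat) : Int) = (pre.length : Int) + 1 := by
      simp [List.length_append]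
    simp only [hget]
    cases hp : pre.getLast? with
    | none =>
      have hpre0 : pre = [] := List.getLast?_eq_none_iff.1 hp
      have h0 : (pre.length : Int) = 0 := by simp [hpre0]
      by_cases hI : PySem.Str.startswith l "I-" = true
      · rw [if_pos ⟨hI, Or.inl h0⟩]
        have h := ih (pre ++ [l]) (acc ++ ["B-" ++ pvSuf l]) (n + 1) hpre'
        rw [hlast', hcast] at h
        rw [h, pvGo, if_pos hI]
      · rw [if_neg (by rintro ⟨h1, -⟩; exact hI h1)]
        have h := ih (pre ++ [l]) (acc ++ [l]) n hpre'
        rw [hlast', hcast] at h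
        rw [h, pvGo, if_neg hI]
    | some p =>
      have hne : pre ≠ [] := by intro hnil; subst hnil; simp at hp
      have hlen0 : 0 < pre.length := List.length_pos_iff.2 hne
      have hp' : PySem.List.pyGetD labels ((pre.length : Int) - 1) "" = p := by
        have hcast1 : ((pre.length : Int) - 1) = ((pre.length - 1 : Nat) : Int) := by omega
        rw [hcast1, PySem.List.pyGetD_natCast, hpre]
        have hidx : pre.length - 1 < pre.length := by omega
        rw [List.getLast?_eq_getElem?] at hp
        simp [List.getD, List.getElem?_append_left hidx, hp]
      have hcond : ((pre.length : Int) = 0 ∨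
          pvSuf (PySem.List.pyGetD labels ((pre.length : Int) - 1) "") ≠ pvSuf l) ↔
          pvSuf p ≠ pvSuf l := by
        rw [hp']
        constructor
        · rintro (h | h)
          · omega
          · exact h
        · exact Or.inr
      by_cases hc : PySem.Str.startswith l "I-" = true ∧
          ((pre.length : Int) = 0 ∨
            pvSuf (PySem.List.pyGetD labels ((pre.length : Int) - 1) "") ≠ pvSuf l)
      · rw [if_pos hc]
        have h := ih (pre ++ [l]) (acc ++ ["B-" ++ pvSuf l]) (n + 1) hpre'
        rw [hlast', hcast] at h
        rw [h, pvGo, if_pos (by rw [hc.1]; simp [hcond.1 hc.2])]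
      · rw [if_neg hc]
        have h := ih (pre ++ [l]) (acc ++ [l]) n hpre'
        rw [hlast', hcast] at h
        rw [h, pvGo, if_neg (by
          simp only [Bool.and_eq_true, decide_eq_true_eq]
          rintro ⟨h1, h2⟩
          exact hc ⟨h1, hcond.2 h2⟩)]

-- bridge: with enough fuel, pvRunEnd never runs out before the loop condition fails
theorem pvRunEnd_ge (labels : List String) (suffix : String) :
    ∀ (fuel k : Nat), k ≤ pvRunEnd labels suffix fuel k := by
  intro fuel
  induction fuel with
  | zero => intro k; exact le_refl k
  | succ fuel ih =>
    intro k
    rw [pvRunEnd]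
    split
    · split
      · exact le_trans (Nat.le_succ k) (ih (k + 1))
      · exact le_refl k
    · exact le_refl k

-- pvRunEnd/take compute exactly pvSplitRun on the dropped suffix of the list
theorem pvSplitRun_drop (labels : List String) (suffix : String) :
    ∀ (fuel k : Nat), labels.length - k ≤ fuel →
      pvSplitRun suffix (labels.drop k) =
        ((labels.drop k).take (pvRunEnd labels suffix fuel k - k),
          labels.drop (pvRunEnd labels suffix fuel k)) := by
  intro fuel
  induction fuel with
  | zero =>
    intro k hf
    have hnil : labels.drop k = [] := List.drop_eq_nil_of_le (by omega)
    simp [hnil, pvSplitRun, pvRunEnd]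
  | succ fuel ih =>
    intro k hf
    rw [pvRunEnd]
    by_cases h : k < labels.length
    · rw [dif_pos h]
      have hdrop : labels.drop k = labels[k] :: labels.drop (k + 1) :=
        List.drop_eq_getElem_cons h
      by_cases he : pvSuf labels[k] = suffix
      · rw [if_pos he]
        have hIH := ih (k + 1) (by omega)
        have hge := pvRunEnd_ge labels suffix fuel (k + 1)
        have hsub : pvRunEnd labels suffix fuel (k + 1) - k =
            (pvRunEnd labels suffix fuel (k + 1) - (k + 1)) + 1 := by omega
        rw [hdrop]
        simp only [pvSplitRun, if_pos he, hIH, hsub, List.take_succ_cons]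
      · rw [if_neg he, hdrop]
        simp [pvSplitRun, he, ← hdrop]
    · rw [dif_neg h]
      have hnil : labels.drop k = [] := List.drop_eq_nil_of_le (by omega)
      simp [hnil, pvSplitRun]

-- B's index loop equals the list-level loop on the remaining suffix of the list
theorem pvAltGo_eq (labels : List String) :
    ∀ (fuel i : Nat) (fixed : List String) (num : Int), labels.length - i ≤ fuel →
      pvAltGo labels fuel fixed num i = pvAltLoop fixed num (labels.drop i) := by
  intro fuel
  induction fuel with
  | zero =>
    intro i fixed num hf
    have hnil : labels.drop i = [] := List.drop_eq_nil_of_le (by omega)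
    rw [hnil, pvAltGo, pvAltLoop]
  | succ fuel ih =>
    intro i fixed num hf
    rw [pvAltGo]
    by_cases h : i < labels.length
    · rw [dif_pos h]
      have hdrop : labels.drop i = labels[i] :: labels.drop (i + 1) :=
        List.drop_eq_getElem_cons h
      have hge := pvRunEnd_ge labels (pvSuf labels[i]) (labels.length - (i + 1)) (i + 1)
      have hsr := pvSplitRun_drop labels (pvSuf labels[i])
        (labels.length - (i + 1)) (i + 1) (le_refl _)
      have hslice : PySem.List.slice labels (some ((i + 1 : Nat) : Int))
          (some ((pvRunEnd labels (pvSuf labels[i]) (labels.length - (i + 1)) (i + 1) : Nat) : Int)) =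
          (labels.drop (i + 1)).take
            (pvRunEnd labels (pvSuf labels[i]) (labels.length - (i + 1)) (i + 1) - (i + 1)) :=
        PySem.List.slice_natCast ..
      have hIH := fun (fx : List String) (nm : Int) =>
        ih (pvRunEnd labels (pvSuf labels[i]) (labels.length - (i + 1)) (i + 1)) fx nm
          (by omega)
      rw [hdrop, pvAltLoop_cons]
      simp only [hsr, hslice]
      split_ifs with hI
      · rw [hIH]
      · rw [hIH]
    · rw [dif_neg h]
      have hnil : labels.drop i = [] := List.drop_eq_nil_of_le (by omega)
      rw [hnil, pvAltLoop]

-- ===== VERDICT (by name: the statement is the Claim_ definition above) =====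
theorem fix_initial_i_tags_spec : Claim_equal_fix_initial_i_tags := by
  intro labels _
  unfold Spec_fix_initial_i_tags fix_initial_i_tags fix_initial_i_tags_alt
  have h0 := pvFold_eq_go labels labels [] [] 0 rfl
  simp only [List.length_nil, Nat.cast_zero, List.getLast?_nil] at h0
  rw [h0, pvAltGo_eq labels labels.length 0 [] 0 (by omega), List.drop_zero]
  exact pvGo_eq_altLoop labels none [] 0 (by intro p hd hcontr; cases hcontr)
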